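-- pv_equiv track=rewrite | github.com/facubusta/Truco | funciones/jugador.py | jugar_maquina
-- ===== SOURCE A (Python) =====
-- def jugar_maquina(mano: list, carta_jugada: tuple = None) -> tuple:
--     """
--     Estrategia de la máquina para jugar una carta.
--     Si se proporciona una carta_jugada, intenta superarla. Si no, juega su carta más alta.
--     """
--     mano_ordenada = sorted(mano, key=lambda carta: carta[0], reverse=True)
--
--     if carta_jugada is None:
--         # Si no hay una carta jugada, juega la carta más alta
--         return mano_ordenada[0]
--
--     # Si hay una carta jugada, intenta superarla
--     for carta in mano_ordenada:
--         if carta[0] > carta_jugada[0]: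
--             return carta
--
--     # Si no puede superar la carta jugada, juega la más baja
--     return mano_ordenada[-1]
-- ===== SOURCE B (Python) =====
-- def jugar_maquina(mano: list, carta_jugada: tuple = None) -> tuple:
--     mas_alta = max(mano, key=lambda c: c[0])
--     if carta_jugada is None or mas_alta[0] > carta_jugada[0]:
--         return mas_alta
--     # cannot beat it: play the lowest card (last occurrence of the minimum)
--     return min(reversed(mano), key=lambda c: c[0])
-- ===== Notes on version B (the rewrite author's own statement) =====
-- stated objective: simpler
-- what changed: Replaces the descending stable sort plus linear scan by direct max/min selection: return the first-occurrence maximum if it beats the played card (or none was played), else the last-occurrence minimum via min over the reversed hand.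
-- outside the precondition, e.g. on jugar_maquina([], None): A raises IndexError, B raises ValueError
import Mathlib
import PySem

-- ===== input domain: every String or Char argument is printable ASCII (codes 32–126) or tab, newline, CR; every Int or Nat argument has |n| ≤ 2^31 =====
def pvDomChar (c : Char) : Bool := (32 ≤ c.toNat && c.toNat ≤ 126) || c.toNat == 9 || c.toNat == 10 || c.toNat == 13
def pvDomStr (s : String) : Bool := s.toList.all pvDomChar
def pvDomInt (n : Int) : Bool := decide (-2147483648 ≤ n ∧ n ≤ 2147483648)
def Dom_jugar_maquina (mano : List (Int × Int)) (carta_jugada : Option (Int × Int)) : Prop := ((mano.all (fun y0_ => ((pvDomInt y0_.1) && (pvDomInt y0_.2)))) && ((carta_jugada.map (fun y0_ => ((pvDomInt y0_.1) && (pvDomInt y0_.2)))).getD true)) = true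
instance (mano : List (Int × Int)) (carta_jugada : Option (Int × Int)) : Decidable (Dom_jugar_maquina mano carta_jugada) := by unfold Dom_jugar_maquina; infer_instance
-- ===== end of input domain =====

-- B replaces A's descending stable sort + scan with direct max/min selection (first-occurrence max, last-occurrence min via the reversed hand); objective: simpler.


-- ===== PORT A =====
-- sorted(mano, key=carta[0], reverse=True); mano_ordenada[0] / the first carta with carta[0] > carta_jugada[0] / mano_ordenada[-1].
-- pyGet? returns none exactly where Python raises IndexError (empty hand): excluded by Pre_, .getD (0,0) is unreachable there.
def jugar_maquina (mano : List (Int × Int)) (carta_jugada : Option (Int × Int)) : Int × Int :=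
  let mano_ordenada := PySem.List.sorted mano (fun carta => carta.1) true
  match carta_jugada with
  | none => (PySem.List.pyGet? mano_ordenada 0).getD (0, 0)
  | some cj =>
    match mano_ordenada.find? (fun carta => decide (carta.1 > cj.1)) with
    | some carta => carta
    | none => (PySem.List.pyGet? mano_ordenada (-1)).getD (0, 0)

-- ===== PORT B =====
-- max(mano, key=c[0]); if it beats the played card (or none) return it; else min(reversed(mano), key=c[0]).
-- max?/min? return none exactly where Python's max/min raise ValueError (empty hand): excluded by Pre_.
def jugar_maquina_alt (mano : List (Int × Int)) (carta_jugada : Option (Int × Int)) : Int × Int :=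
  match PySem.List.max? mano (fun c => c.1) with
  | none => (0, 0)
  | some mas_alta =>
    match carta_jugada with
    | none => mas_alta
    | some cj =>
      if mas_alta.1 > cj.1 then mas_alta
      else (PySem.List.min? mano.reverse (fun c => c.1)).getD (0, 0)

-- ===== PRECONDITION & SPEC =====
-- A raises IndexError on an empty hand (and B's max/min raise ValueError there): the empty list is excluded.
def Pre_jugar_maquina (mano : List (Int × Int)) (carta_jugada : Option (Int × Int)) : Prop := mano ≠ []
instance (mano : List (Int × Int)) (carta_jugada : Option (Int × Int)) : Decidable (Pre_jugar_maquina mano carta_jugada) := by unfold Pre_jugar_maquina; infer_instance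
def pvWitness_jugar_maquina : (List (Int × Int)) × (Option (Int × Int)) := ([(3, 1), (1, 2)], some (2, 0))
def Spec_jugar_maquina (mano : List (Int × Int)) (carta_jugada : Option (Int × Int)) (out : Int × Int) : Prop := out = jugar_maquina_alt mano carta_jugada
instance (mano : List (Int × Int)) (carta_jugada : Option (Int × Int)) (out : Int × Int) : Decidable (Spec_jugar_maquina mano carta_jugada out) := by unfold Spec_jugar_maquina; infer_instance

-- ===== CLAIM (what is proved, stated in full; the proofs are below) =====
def Claim_equal_jugar_maquina : Prop := ∀ (mano : List (Int × Int)) (carta_jugada : Option (Int × Int)), Dom_jugar_maquina mano carta_jugada → Pre_jugar_maquina mano carta_jugada → Spec_jugar_maquina mano carta_jugada (jugar_maquina mano carta_jugada)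

-- ===== LEMMAS AND PROOFS =====

-- the insertion step of A's stable descending sort
def pvIns (x : Int × Int) (acc : List (Int × Int)) : List (Int × Int) :=
  PySem.List.insertBy (fun a b => decide (b.1 < a.1)) x acc

-- the running-extremum steps of Python max / min (first occurrence wins)
def pvMaxStep (o : Option (Int × Int)) (x : Int × Int) : Option (Int × Int) :=
  match o with
  | none => some x
  | some m => if m.1 < x.1 then some x else some m

def pvMinStep (o : Option (Int × Int)) (x : Int × Int) : Option (Int × Int) :=
  match o with
  | none => some x
  | some m => if x.1 < m.1 then some x else some m

-- "combine a new candidate x with an optional current extremum"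
def pvComb (x : Int × Int) (o : Option (Int × Int)) : Option (Int × Int) :=
  match o with
  | none => some x
  | some m => if m.1 < x.1 then some m else some x

lemma max?_eq_foldl (l : List (Int × Int)) :
    PySem.List.max? l (fun c => c.1) = l.foldl pvMaxStep none := by
  unfold PySem.List.max?
  congr 1
  funext o x
  cases o <;> rfl

lemma min?_eq_foldl (l : List (Int × Int)) :
    PySem.List.min? l (fun c => c.1) = l.foldl pvMinStep none := by
  unfold PySem.List.min?
  congr 1
  funext o x
  cases o <;> rfl

lemma head_pvIns (x : Int × Int) (acc : List (Int × Int)) :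
    (pvIns x acc).head? = pvMaxStep acc.head? x := by
  cases acc with
  | nil => simp [pvIns, PySem.List.insertBy, pvMaxStep]
  | cons y ys =>
    simp only [pvIns, PySem.List.insertBy, pvMaxStep, List.head?_cons]
    by_cases h : y.1 < x.1 <;> simp [h]

lemma head_foldl_pvIns (xs : List (Int × Int)) :
    ∀ acc : List (Int × Int),
      ((xs.foldl (fun acc x => pvIns x acc) acc).head?) = xs.foldl pvMaxStep acc.head? := by
  induction xs with
  | nil => intro acc; rfl
  | cons y ys ih =>
    intro acc
    simp only [List.foldl_cons]
    rw [ih (pvIns y acc), head_pvIns]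

-- head of A's descending stable sort = Python's max (first occurrence of the maximal key)
lemma head_sorted_rev_eq_max (mano : List (Int × Int)) :
    (PySem.List.sorted mano (fun c => c.1) true).head? = PySem.List.max? mano (fun c => c.1) := by
  rw [PySem.List.sorted_rev_eq_foldl_insertBy, max?_eq_foldl]
  have h := head_foldl_pvIns mano []
  simpa [pvIns] using h

-- folding the first-min step from a some-seed
lemma foldl_min_some (l : List (Int × Int)) :
    ∀ x : Int × Int, l.foldl pvMinStep (some x) = pvComb x (l.foldl pvMinStep none) := by
  induction l with
  | nil => intro x; rfl
  | cons y l' ih =>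
    intro x
    simp only [List.foldl_cons]
    have hn : pvMinStep none y = some y := rfl
    rw [hn, ih y]
    have hs : pvMinStep (some x) y = if y.1 < x.1 then some y else some x := rfl
    rw [hs]
    by_cases h : y.1 < x.1 <;> simp only [h, if_true, if_false] <;> rw [ih] <;>
      cases hF : l'.foldl pvMinStep none with
    | none => simp [pvComb, h]
    | some m =>
      by_cases h2 : m.1 < y.1 <;> by_cases h3 : m.1 < x.1 <;>
        simp [pvComb, h, h2, h3] <;> first | rfl | (exfalso; omega)

lemma min?_cons (x : Int × Int) (l : List (Int × Int)) :
    PySem.List.min? (x :: l) (fun c => c.1) = pvComb x (PySem.List.min? l (fun c => c.1)) := by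
  rw [min?_eq_foldl, min?_eq_foldl, List.foldl_cons]
  exact foldl_min_some l x

lemma getLast_pvIns (x : Int × Int) :
    ∀ s : List (Int × Int), s.Pairwise (fun a b => b.1 ≤ a.1) →
      (pvIns x s).getLast? = pvComb x s.getLast? := by
  intro s
  induction s with
  | nil => intro _; rfl
  | cons y s' ih =>
    intro hp
    have hp' : s'.Pairwise (fun a b => b.1 ≤ a.1) := hp.of_cons
    have hall : ∀ z ∈ s', z.1 ≤ y.1 := fun z hz => List.rel_of_pairwise_cons hp hz
    by_cases h : y.1 < x.1
    · have hIns : pvIns x (y :: s') = x :: y :: s' := by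
        simp [pvIns, PySem.List.insertBy, h]
      rw [hIns]
      cases hL : (y :: s').getLast? with
      | none => simp at hL
      | some l =>
        have hlm : l ∈ y :: s' := List.mem_of_getLast? hL
        have hlx : l.1 < x.1 := by
          rcases List.mem_cons.mp hlm with h1 | h2
          · subst h1; exact h
          · exact lt_of_le_of_lt (hall _ h2) h
        rw [List.getLast?_cons_cons, hL]
        simp [pvComb, hlx]
    · have hIns : pvIns x (y :: s') = y :: pvIns x s' := by
        simp [pvIns, PySem.List.insertBy, h]
      rw [hIns]
      cases s' with
      | nil => simp [pvComb, pvIns, PySem.List.insertBy, h]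
      | cons z s'' =>
        have hne : pvIns x (z :: s'') ≠ [] := by
          simp only [pvIns, PySem.List.insertBy]
          split_ifs <;> simp
        calc (y :: pvIns x (z :: s'')).getLast?
            = (pvIns x (z :: s'')).getLast? := by
              rw [List.getLast?_cons]
              cases hI : (pvIns x (z :: s'')).getLast? with
              | none => exact absurd (List.getLast?_eq_none_iff.mp hI) hne
              | some w => rfl
          _ = pvComb x (z :: s'').getLast? := ih hp'
          _ = pvComb x (y :: z :: s'').getLast? := by rw [List.getLast?_cons_cons]

lemma sorted_rev_append_singleton (xs : List (Int × Int)) (x : Int × Int) :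
    PySem.List.sorted (xs ++ [x]) (fun c => c.1) true =
      pvIns x (PySem.List.sorted xs (fun c => c.1) true) := by
  rw [PySem.List.sorted_rev_eq_foldl_insertBy, PySem.List.sorted_rev_eq_foldl_insertBy,
      List.foldl_append]
  rfl

-- last of A's descending stable sort = Python's min over the reversed hand (last occurrence of the minimal key)
lemma getLast_sorted_rev_eq_min_reverse (mano : List (Int × Int)) :
    (PySem.List.sorted mano (fun c => c.1) true).getLast? =
      PySem.List.min? mano.reverse (fun c => c.1) := by
  induction mano using List.reverseRecOn with
  | nil => rfl
  | append_singleton xs x ih =>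
    rw [sorted_rev_append_singleton,
        getLast_pvIns x _ (PySem.List.sorted_pairwise_rev xs (fun c => c.1)), ih,
        List.reverse_append, List.reverse_singleton, List.singleton_append, min?_cons]

lemma pyGet?_neg_one_eq_getLast? (l : List (Int × Int)) (h : l ≠ []) :
    PySem.List.pyGet? l (-1) = l.getLast? := by
  have hlen : 1 ≤ l.length := List.length_pos_iff.mpr h
  have h1 : ¬ ((0 : Int) ≤ -1) := by omega
  have h2 : (-(l.length : Int) ≤ -1) := by omega
  simp only [PySem.List.pyGet?, PySem.List.pyIdx?, h1, h2, ite_true,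
    ite_false, Option.bind_some]
  rw [List.getLast?_eq_getElem?]
  congr 1

-- ===== VERDICT (by name: the statement is the Claim_ definition above) =====
theorem jugar_maquina_spec : Claim_equal_jugar_maquina := by
  intro mano carta_jugada _ hpre
  unfold Spec_jugar_maquina
  have hsne : PySem.List.sorted mano (fun c => c.1) true ≠ [] := by
    simpa [PySem.List.sorted_eq_nil_iff] using hpre
  cases hs : PySem.List.sorted mano (fun c => c.1) true with
  | nil => exact absurd hs hsne
  | cons m t =>
    have hmax : PySem.List.max? mano (fun c => c.1) = some m := by
      rw [← head_sorted_rev_eq_max, hs]; rfl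
    have hmin : PySem.List.min? mano.reverse (fun c => c.1) = (m :: t).getLast? := by
      rw [← getLast_sorted_rev_eq_min_reverse, hs]
    cases carta_jugada with
    | none =>
      simp only [jugar_maquina, jugar_maquina_alt, hs, hmax]
      simp [PySem.List.pyGet?, PySem.List.pyIdx?]
    | some cj =>
      by_cases hbeat : m.1 > cj.1
      · simp only [jugar_maquina, jugar_maquina_alt, hs, hmax]
        simp [hbeat]
      · have hall : ∀ y ∈ m :: t, ¬ y.1 > cj.1 := by
          intro y hy
          have hym : y ∈ mano :=
            (PySem.List.mem_sorted (x := y) (xs := mano) (key := fun c => c.1) (rev := true)).mp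
              (hs ▸ hy)
          have := PySem.List.key_head_sorted_rev_ge mano (fun c => c.1) hs y hym
          simp only [gt_iff_lt, not_lt] at hbeat ⊢
          exact le_trans this hbeat
        have hfind : (m :: t).find? (fun carta => decide (carta.1 > cj.1)) = none := by
          rw [List.find?_eq_none]
          intro y hy; simpa using hall y hy
        have hlast := pyGet?_neg_one_eq_getLast? (m :: t) (by simp)
        simp only [jugar_maquina, jugar_maquina_alt, hs, hmax, hfind, hlast, hmin, hbeat,
          if_false]
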